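-- pv_equiv track=rewrite | github.com/arris-ray/omscs | cs6515/homework/dp-6.3/dp-6.3.py | QVH1
-- ===== SOURCE A (Python) =====
-- def QVH1(M, P, k):
--     # Validate we have anything to choose
--     if len(M) == 0 or len(P) == 0:
--         return 0
--
--     profits = []
--     for i, m in enumerate(M):
--         # Base case
--         if (i == 0):
--             profits.append(P[i])
--             continue
--
--         # Determine max profit of the last location k distance behind
--         P_j = 0
--         for j in range(i):
--             if M[j] <= (m - k):
--                 P_j = profits[j]
--
--         # Determine max profit for current location
--         profit = max(profits[i-1], P[i] + P_j)
--         profits.append(profit)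
--
--     # Report max profit at the last location
--     return profits[len(M)-1]
-- ===== SOURCE B (Python) =====
-- def QVH1(M, P, k):
--     if len(M) == 0 or len(P) == 0:
--         return 0
--     # stack of (value, profit-at-that-location) for the back-record minima
--     # of the prefix seen so far; nearest j with M[j] <= x is always on it.
--     last = P[0]
--     stack = [(M[0], last)]
--     for i in range(1, len(M)):
--         x = M[i] - k
--         pj = 0
--         for v, p in reversed(stack):
--             if v <= x:
--                 pj = p
--                 break
--         last = max(last, P[i] + pj)
--         while stack and stack[-1][0] >= M[i]:
--             stack.pop()
--         stack.append((M[i], last))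
--     return last
-- ===== Notes on version B (the rewrite author's own statement) =====
-- stated objective: faster
-- what changed: A rescans all previous locations for every i; B maintains a monotonic stack of back-record minima (value, profit) so each query scans only that stack and each element is pushed/popped once.
import Mathlib
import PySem

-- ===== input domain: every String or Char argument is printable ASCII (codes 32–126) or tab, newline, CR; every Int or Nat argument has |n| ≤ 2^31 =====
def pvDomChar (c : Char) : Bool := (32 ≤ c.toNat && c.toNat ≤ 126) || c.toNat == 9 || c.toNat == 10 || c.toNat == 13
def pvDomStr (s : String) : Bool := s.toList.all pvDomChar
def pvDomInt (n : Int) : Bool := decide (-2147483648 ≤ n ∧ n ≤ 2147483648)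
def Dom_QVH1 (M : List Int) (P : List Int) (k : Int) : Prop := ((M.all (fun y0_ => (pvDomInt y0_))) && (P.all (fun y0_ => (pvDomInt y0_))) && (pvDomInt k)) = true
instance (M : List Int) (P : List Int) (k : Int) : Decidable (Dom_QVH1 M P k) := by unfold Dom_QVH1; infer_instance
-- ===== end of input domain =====

-- B replaces A's O(n^2) inner rescans by a monotonic stack of back-record minima
-- queried from the top (objective: faster on typical data; same results).

-- ===== PORT A =====
-- indices i, j and i-1 are in range under Pre_, so List.getD is exact there
def QVH1 (M : List Int) (P : List Int) (k : Int) : Int :=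
  if M.length = 0 ∨ P.length = 0 then 0
  else
    let profits := (List.range M.length).foldl (fun profits i =>
      if i = 0 then profits ++ [P.getD 0 0]
      else
        let pj := (List.range i).foldl
          (fun pj j => if M.getD j 0 ≤ M.getD i 0 - k then profits.getD j 0 else pj) 0
        profits ++ [max (profits.getD (i-1) 0) (P.getD i 0 + pj)]) ([] : List Int)
    profits.getD (M.length - 1) 0

-- ===== PORT B =====
-- Source B: `for v, p in reversed(stack): if v <= x: pj = p; break` (scan from the top)
def qTop (st : List (Int × Int)) (x : Int) : Int :=
  if h : st = [] then 0
  else if (st.getLast h).1 ≤ x then (st.getLast h).2 else qTop st.dropLast x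
termination_by st.length
decreasing_by simpa using Nat.sub_lt (List.length_pos_iff.mpr h) one_pos

-- Source B: `while stack and stack[-1][0] >= M[i]: stack.pop()`
def popGE (st : List (Int × Int)) (v : Int) : List (Int × Int) :=
  if h : st = [] then []
  else if v ≤ (st.getLast h).1 then popGE st.dropLast v else st
termination_by st.length
decreasing_by simpa using Nat.sub_lt (List.length_pos_iff.mpr h) one_pos

def QVH1_alt (M : List Int) (P : List Int) (k : Int) : Int :=
  if M.length = 0 ∨ P.length = 0 then 0
  else
    let s := (List.range' 1 (M.length - 1)).foldl
      (fun (s : Int × List (Int × Int)) i =>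
        let pj := qTop s.2 (M.getD i 0 - k)
        let last := max s.1 (P.getD i 0 + pj)
        (last, popGE s.2 (M.getD i 0) ++ [(M.getD i 0, last)]))
      (P.getD 0 0, [(M.getD 0 0, P.getD 0 0)])
    s.1

-- ===== PRECONDITION & SPEC =====
-- Pre_ excludes exactly the inputs where Python A raises IndexError: 0 < len(P) < len(M)
def Pre_QVH1 (M : List Int) (P : List Int) (k : Int) : Prop :=
  M = [] ∨ P = [] ∨ M.length ≤ P.length
instance (M : List Int) (P : List Int) (k : Int) : Decidable (Pre_QVH1 M P k) := by
  unfold Pre_QVH1; infer_instance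

def pvWitness_QVH1 : List Int × List Int × Int := ([1, 3, 2], [2, 5, 4], 2)

def Spec_QVH1 (M : List Int) (P : List Int) (k : Int) (out : Int) : Prop := out = QVH1_alt M P k
instance (M : List Int) (P : List Int) (k : Int) (out : Int) : Decidable (Spec_QVH1 M P k out) := by unfold Spec_QVH1; infer_instance

-- ===== CLAIM (what is proved, stated in full; the proofs are below) =====
def Claim_equal_QVH1 : Prop := ∀ (M : List Int) (P : List Int) (k : Int), Dom_QVH1 M P k → Pre_QVH1 M P k → Spec_QVH1 M P k (QVH1 M P k)

-- ===== LEMMAS AND PROOFS =====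

-- A's profits list after the first n outer-loop iterations
def aProfL (M : List Int) (P : List Int) (k : Int) : Nat → List Int
  | 0 => []
  | (i+1) =>
    let profits := aProfL M P k i
    if i = 0 then profits ++ [P.getD 0 0]
    else
      let pj := (List.range i).foldl
        (fun pj j => if M.getD j 0 ≤ M.getD i 0 - k then profits.getD j 0 else pj) 0
      profits ++ [max (profits.getD (i-1) 0) (P.getD i 0 + pj)]

-- A's profit value at index i
def aVal (M : List Int) (P : List Int) (k : Int) (i : Nat) : Int :=
  (aProfL M P k (i+1)).getD i 0

-- A's inner-loop result over the first t indices, as a function of the query bound x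
def innerQ (M : List Int) (P : List Int) (k : Int) (t : Nat) (x : Int) : Int :=
  (List.range t).foldl (fun a j => if M.getD j 0 ≤ x then aVal M P k j else a) 0

lemma aProfL_length (M P : List Int) (k : Int) : ∀ n, (aProfL M P k n).length = n := by
  intro n; induction n with
  | zero => rfl
  | succ i ih => by_cases h : i = 0 <;> simp [aProfL, h, ih]

lemma getD_concat (l : List Int) (v : Int) : (l ++ [v]).getD l.length 0 = v := by
  induction l with
  | nil => rfl
  | cons a t ih => simpa using ih

lemma aProfL_getD (M P : List Int) (k : Int) :
    ∀ i j, j < i → (aProfL M P k i).getD j 0 = aVal M P k j := by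
  intro i
  induction i with
  | zero => omega
  | succ i ih =>
    intro j hj
    rcases Nat.lt_succ_iff_lt_or_eq.mp hj with h | h
    · have hlen : j < (aProfL M P k i).length := by rw [aProfL_length]; exact h
      have : aProfL M P k (i+1) = aProfL M P k i ++
          (aProfL M P k (i+1)).drop (aProfL M P k i).length := by
        by_cases h0 : i = 0 <;> simp [aProfL, h0, aProfL_length]
      rw [this, List.getD_append _ _ _ _ hlen, ih j h]
    · subst h; rfl

lemma aVal_succ (M P : List Int) (k : Int) (i : Nat) :
    aVal M P k (i+1) =
      max (aVal M P k i) (P.getD (i+1) 0 + innerQ M P k (i+1) (M.getD (i+1) 0 - k)) := by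
  have hfold : (List.range (i+1)).foldl
      (fun pj j => if M.getD j 0 ≤ M.getD (i+1) 0 - k then (aProfL M P k (i+1)).getD j 0 else pj) 0
      = innerQ M P k (i+1) (M.getD (i+1) 0 - k) := by
    unfold innerQ
    apply PySem.List.foldl_congr_mem
    intro acc j hj
    rw [aProfL_getD M P k (i+1) j (List.mem_range.mp hj)]
  have h1 : aProfL M P k (i+2) = aProfL M P k (i+1) ++
      [max ((aProfL M P k (i+1)).getD i 0) (P.getD (i+1) 0 +
        (List.range (i+1)).foldl
          (fun pj j => if M.getD j 0 ≤ M.getD (i+1) 0 - k then (aProfL M P k (i+1)).getD j 0 else pj) 0)] := by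
    simp [aProfL]
  unfold aVal
  rw [h1]
  have hthis := getD_concat (aProfL M P k (i+1))
      (max ((aProfL M P k (i+1)).getD i 0) (P.getD (i+1) 0 +
        (List.range (i+1)).foldl
          (fun pj j => if M.getD j 0 ≤ M.getD (i+1) 0 - k then (aProfL M P k (i+1)).getD j 0 else pj) 0))
  rw [aProfL_length M P k (i+1)] at hthis
  rw [hthis, hfold, aProfL_getD M P k (i+1) i (Nat.lt_succ_self i)]

-- A's fold builds exactly aProfL
lemma a_fold_eq (M P : List Int) (k : Int) : ∀ n,
    (List.range n).foldl (fun profits i =>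
      if i = 0 then profits ++ [P.getD 0 0]
      else
        let pj := (List.range i).foldl
          (fun pj j => if M.getD j 0 ≤ M.getD i 0 - k then profits.getD j 0 else pj) 0
        profits ++ [max (profits.getD (i-1) 0) (P.getD i 0 + pj)]) ([] : List Int)
      = aProfL M P k n := by
  intro n
  induction n with
  | zero => rfl
  | succ i ih => rw [List.range_succ, List.foldl_append, ih]; rfl

lemma qTop_nil (x : Int) : qTop [] x = 0 := by rw [qTop.eq_def]; rfl

lemma qTop_concat (st : List (Int × Int)) (a : Int × Int) (x : Int) :
    qTop (st ++ [a]) x = if a.1 ≤ x then a.2 else qTop st x := by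
  rw [qTop.eq_def]
  simp

lemma popGE_nil (v : Int) : popGE [] v = [] := by rw [popGE.eq_def]; rfl

lemma popGE_concat (st : List (Int × Int)) (a : Int × Int) (v : Int) :
    popGE (st ++ [a]) v = if v ≤ a.1 then popGE st v else st ++ [a] := by
  rw [popGE.eq_def]
  simp

lemma qTop_popGE (v x : Int) (h : x < v) :
    ∀ st : List (Int × Int), qTop (popGE st v) x = qTop st x := by
  intro st
  induction st using List.reverseRecOn with
  | nil => rw [popGE_nil]
  | append_singleton st a ih =>
    rw [popGE_concat, qTop_concat]
    by_cases hv : v ≤ a.1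
    · rw [if_pos hv, ih, if_neg (by omega)]
    · rw [if_neg hv, qTop_concat]

-- the invariant of B's loop
lemma b_inv (M P : List Int) (k : Int) : ∀ t : Nat,
    (((List.range' 1 t).foldl
      (fun (s : Int × List (Int × Int)) i =>
        let pj := qTop s.2 (M.getD i 0 - k)
        let last := max s.1 (P.getD i 0 + pj)
        (last, popGE s.2 (M.getD i 0) ++ [(M.getD i 0, last)]))
      (P.getD 0 0, [(M.getD 0 0, P.getD 0 0)])).1 = aVal M P k t)
    ∧ (∀ x : Int, qTop ((List.range' 1 t).foldl
      (fun (s : Int × List (Int × Int)) i =>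
        let pj := qTop s.2 (M.getD i 0 - k)
        let last := max s.1 (P.getD i 0 + pj)
        (last, popGE s.2 (M.getD i 0) ++ [(M.getD i 0, last)]))
      (P.getD 0 0, [(M.getD 0 0, P.getD 0 0)])).2 x = innerQ M P k (t+1) x) := by
  intro t
  induction t with
  | zero =>
    constructor
    · rfl
    · intro x
      show qTop ([] ++ [(M.getD 0 0, P.getD 0 0)]) x = _
      rw [qTop_concat]
      simp [innerQ, qTop_nil, aVal, aProfL]
  | succ t ih =>
    obtain ⟨ih1, ih2⟩ := ih
    rw [show (t+1) = t + 1 from rfl, List.range'_concat, List.foldl_append]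
    have hidx : 1 + 1 * t = t + 1 := by omega
    constructor
    · simp only [List.foldl_cons, List.foldl_nil, hidx, ih1, ih2]
      rw [aVal_succ]
    · intro x
      simp only [List.foldl_cons, List.foldl_nil, hidx, ih1, ih2]
      rw [qTop_concat]
      have hrange : List.range (t+2) = List.range (t+1) ++ [t+1] := List.range_succ
      unfold innerQ
      rw [hrange, List.foldl_append]
      simp only [List.foldl_cons, List.foldl_nil]
      by_cases hx : M.getD (t+1) 0 ≤ x
      · rw [if_pos hx, if_pos hx, aVal_succ]; rfl
      · rw [if_neg hx, if_neg hx, qTop_popGE _ _ (by omega), ih2 x]; rfl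

-- ===== VERDICT (by name: the statement is the Claim_ definition above) =====
theorem QVH1_spec : Claim_equal_QVH1 := by
  intro M P k _ _
  show QVH1 M P k = QVH1_alt M P k
  unfold QVH1 QVH1_alt
  by_cases h : M.length = 0 ∨ P.length = 0
  · rw [if_pos h, if_pos h]
  · rw [if_neg h, if_neg h]
    simp only []
    rw [a_fold_eq M P k M.length]
    rw [(b_inv M P k (M.length - 1)).1]
    exact aProfL_getD M P k M.length (M.length - 1) (by omega)
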